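-- pv_equiv track=rewrite | github.com/MrBrantCode/unitest_baseline | mut_generate/mist_train_taco/taco_17445/solution.py | calculate_gcd_probability
-- ===== SOURCE A (Python) =====
-- import math
--
-- def calculate_gcd_probability(N):
--     ans = 0
--     x = math.floor(math.sqrt(N))
--     i = 1
--     while i <= x:
--         ans += N // i
--         i += 1
--     ans *= 2
--     ans -= x ** 2
--     num = int(ans)
--     den = N * N
--     g = math.gcd(num, den)
--     return (num // g, den // g)
-- ===== SOURCE B (Python) =====
-- import math
--
-- def calculate_gcd_probability(N):
--     # Divisor summatory value by grouping indices with an equal quotient N // i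
--     # (quotient-block enumeration; no sqrt, no doubling/subtraction).
--     ans = 0
--     i = 1
--     while i <= N:
--         q = N // i
--         j = N // q          # last index with the same quotient q
--         ans += q * (j - i + 1)
--         i = j + 1
--     num = int(ans)
--     den = N * N
--     g = math.gcd(num, den)
--     return (num // g, den // g)
-- ===== Notes on version B (the rewrite author's own statement) =====
-- stated objective: alternative
-- what changed: Replaces A's sqrt-symmetry trick (sum N//i for i up to floor(sqrt(N)), double, subtract x^2) with quotient-block enumeration: advance i to N//(N//i)+1 and add q*(block length) per block of equal quotients; the gcd-reduction tail is unchanged.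
import Mathlib
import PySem

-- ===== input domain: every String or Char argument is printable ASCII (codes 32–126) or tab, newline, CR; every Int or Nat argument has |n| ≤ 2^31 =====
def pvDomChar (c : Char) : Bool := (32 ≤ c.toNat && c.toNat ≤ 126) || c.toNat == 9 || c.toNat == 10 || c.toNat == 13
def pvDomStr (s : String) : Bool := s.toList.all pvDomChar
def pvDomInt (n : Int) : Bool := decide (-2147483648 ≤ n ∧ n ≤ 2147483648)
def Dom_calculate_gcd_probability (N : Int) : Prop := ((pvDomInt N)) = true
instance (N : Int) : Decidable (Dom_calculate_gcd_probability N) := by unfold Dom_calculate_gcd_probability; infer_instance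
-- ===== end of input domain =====

-- B replaces A's sqrt-symmetry trick (loop to floor(sqrt N), double, subtract x^2) with
-- quotient-block enumeration of the full divisor sum (group equal quotients N//i); same value,
-- genuinely different traversal; the gcd-reduction tail is unchanged.

-- ===== PORT A =====
-- math.floor(math.sqrt(N)) is ported as the integer square root Nat.sqrt: exact for the
-- admitted inputs 0 <= N <= 2^31 (the double sqrt floors correctly there); Python raises
-- ValueError for N < 0, which Pre_ excludes.
def calculate_gcd_probability (N : Int) : Int × Int :=
  let x : Int := (Nat.sqrt N.toNat : Int)
  let ans : Int :=
    (PySem.List.pyRange 1 (x + 1) 1).foldl (fun a i => a + PySem.Int.floordiv N i) 0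
  let ans2 : Int := ans * 2
  let ans3 : Int := ans2 - x ^ 2
  let num : Int := ans3
  let den : Int := N * N
  let g : Int := (Int.gcd num den : Int)
  (PySem.Int.floordiv num g, PySem.Int.floordiv den g)

-- ===== PORT B =====
-- the while loop of Source B; i strictly increases every iteration (for 1 <= i <= N the next
-- index N//(N//i)+1 is > i), so N.toNat + 1 rounds of fuel are enough and the fuel guard
-- never fires on the executed path
def pvAltLoop (N : Int) (fuel : Nat) (i ans : Int) : Int :=
  match fuel with
  | 0 => ans
  | fuel + 1 =>
    if i ≤ N then
      let q := PySem.Int.floordiv N i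
      let j := PySem.Int.floordiv N q
      pvAltLoop N fuel (j + 1) (ans + q * (j - i + 1))
    else ans

def calculate_gcd_probability_alt (N : Int) : Int × Int :=
  let ans : Int := pvAltLoop N (N.toNat + 1) 1 0
  let num : Int := ans
  let den : Int := N * N
  let g : Int := (Int.gcd num den : Int)
  (PySem.Int.floordiv num g, PySem.Int.floordiv den g)

-- ===== PRECONDITION & SPEC =====
-- Python A returns only for integer N >= 1: for N < 0 math.sqrt raises ValueError and for
-- N = 0 the final num // g raises ZeroDivisionError (gcd(0,0) = 0).
def Pre_calculate_gcd_probability (N : Int) : Prop := 1 ≤ N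
instance (N : Int) : Decidable (Pre_calculate_gcd_probability N) := by
  unfold Pre_calculate_gcd_probability; infer_instance
def pvWitness_calculate_gcd_probability : Int := 10

def Spec_calculate_gcd_probability (N : Int) (out : Int × Int) : Prop :=
  out = calculate_gcd_probability_alt N
instance (N : Int) (out : Int × Int) : Decidable (Spec_calculate_gcd_probability N out) := by
  unfold Spec_calculate_gcd_probability; infer_instance

-- ===== CLAIM (what is proved, stated in full; the proofs are below) =====
def Claim_equal_calculate_gcd_probability : Prop := ∀ (N : Int),
  Dom_calculate_gcd_probability N → Pre_calculate_gcd_probability N →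
    Spec_calculate_gcd_probability N (calculate_gcd_probability N)

-- ===== LEMMAS AND PROOFS =====


lemma pv_card_pairs (u : Finset ℕ) (n : ℕ) (hu : ∀ i ∈ u, 0 < i) :
    ((u ×ˢ Finset.Ico 1 (n+1)).filter (fun p => p.1 * p.2 ≤ n)).card
      = ∑ i ∈ u, n / i := by
  rw [Finset.card_eq_sum_card_fiberwise (f := Prod.fst) (t := u)
      (by intro p hp; simp only [Finset.coe_filter, Set.mem_setOf_eq, Finset.mem_product] at hp; exact hp.1.1)]
  refine Finset.sum_congr rfl ?_
  intro i hi
  have hi0 : 0 < i := hu i hi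
  rw [show (((u ×ˢ Finset.Ico 1 (n+1)).filter (fun p => p.1 * p.2 ≤ n)).filter
        (fun p => p.1 = i)).card = (Finset.Ico 1 (n / i + 1)).card from ?_]
  · simp
  · apply Finset.card_bij (fun p _ => p.2)
    · intro p hp
      simp only [Finset.mem_filter, Finset.mem_product, Finset.mem_Ico] at hp ⊢
      obtain ⟨⟨⟨_, hj⟩, hmul⟩, hfst⟩ := hp
      subst hfst
      exact ⟨hj.1, Nat.lt_succ_of_le ((Nat.le_div_iff_mul_le hi0).2 (by rwa [Nat.mul_comm]))⟩
    · intro p hp q hq hpq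
      simp only [Finset.mem_filter] at hp hq
      exact Prod.ext (hp.2.trans hq.2.symm) hpq
    · intro j hj
      simp only [Finset.mem_Ico] at hj
      have hjle : j ≤ n / i := Nat.lt_succ_iff.1 hj.2
      have hmul : i * j ≤ n := by
        rw [Nat.mul_comm]; exact (Nat.le_div_iff_mul_le hi0).1 hjle
      refine ⟨(i, j), ?_, rfl⟩
      simp only [Finset.mem_filter, Finset.mem_product, Finset.mem_Ico]
      refine ⟨⟨⟨hi, ⟨hj.1, Nat.lt_succ_of_le (hjle.trans (Nat.div_le_self n i))⟩⟩, ?_⟩, trivial⟩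
      exact hmul

lemma pv_hyperbola (n : ℕ) :
    (∑ i ∈ Finset.Ico 1 (n+1), n / i) + Nat.sqrt n * Nat.sqrt n
      = 2 * ∑ i ∈ Finset.Ico 1 (Nat.sqrt n + 1), n / i := by
  set x := Nat.sqrt n with hx
  have hxn : x ≤ n := Nat.sqrt_le_self n
  set S : Finset (ℕ × ℕ) :=
    (Finset.Ico 1 (n+1) ×ˢ Finset.Ico 1 (n+1)).filter (fun p => p.1 * p.2 ≤ n) with hS
  have hS1 : S.filter (fun p => p.1 ≤ x)
      = (Finset.Ico 1 (x+1) ×ˢ Finset.Ico 1 (n+1)).filter (fun p => p.1 * p.2 ≤ n) := by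
    ext p
    simp only [hS, Finset.mem_filter, Finset.mem_product, Finset.mem_Ico]
    omega
  have hcard1 : (S.filter (fun p => p.1 ≤ x)).card = ∑ i ∈ Finset.Ico 1 (x+1), n / i := by
    rw [hS1, pv_card_pairs]
    intro i hi; simp only [Finset.mem_Ico] at hi; omega
  have hcard2 : (S.filter (fun p => p.2 ≤ x)).card = (S.filter (fun p => p.1 ≤ x)).card := by
    apply Finset.card_bij (fun p _ => p.swap)
    · intro p hp
      simp only [hS, Finset.mem_filter, Finset.mem_product, Finset.mem_Ico, Prod.fst_swap,
        Prod.snd_swap] at hp ⊢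
      refine ⟨⟨⟨hp.1.1.2, hp.1.1.1⟩, ?_⟩, hp.2⟩
      rw [Nat.mul_comm]; exact hp.1.2
    · intro p _ q _ h; exact Prod.swap_injective h
    · intro q hq
      refine ⟨q.swap, ?_, by simp⟩
      simp only [hS, Finset.mem_filter, Finset.mem_product, Finset.mem_Ico, Prod.fst_swap,
        Prod.snd_swap] at hq ⊢
      refine ⟨⟨⟨hq.1.1.2, hq.1.1.1⟩, ?_⟩, hq.2⟩
      rw [Nat.mul_comm]; exact hq.1.2
  have hunion : S.filter (fun p => p.1 ≤ x) ∪ S.filter (fun p => p.2 ≤ x) = S := by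
    rw [← Finset.filter_or]
    apply Finset.filter_true_of_mem
    intro p hp
    simp only [hS, Finset.mem_filter, Finset.mem_product, Finset.mem_Ico] at hp
    by_contra hc
    rw [not_or] at hc
    simp only [Nat.not_le] at hc
    have h1 : (x+1) * (x+1) ≤ p.1 * p.2 := Nat.mul_le_mul hc.1 hc.2
    have h2 := Nat.lt_succ_sqrt n
    have h3 := hp.2
    nlinarith
  have hinter : S.filter (fun p => p.1 ≤ x) ∩ S.filter (fun p => p.2 ≤ x)
      = Finset.Ico 1 (x+1) ×ˢ Finset.Ico 1 (x+1) := by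
    rw [← Finset.filter_and]
    ext p
    simp only [hS, Finset.mem_filter, Finset.mem_product, Finset.mem_Ico]
    constructor
    · rintro ⟨⟨⟨h1, h2⟩, _⟩, h3, h4⟩; omega
    · rintro ⟨⟨h1, h2⟩, h3, h4⟩
      have hxx : x * x ≤ n := by rw [hx]; exact Nat.sqrt_le n
      have hmul : p.1 * p.2 ≤ n :=
        le_trans (Nat.mul_le_mul (show p.1 ≤ x by omega) (show p.2 ≤ x by omega)) hxx
      exact ⟨⟨⟨⟨h1, by omega⟩, ⟨h3, by omega⟩⟩, hmul⟩, by omega, by omega⟩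
  have hScard : S.card = ∑ i ∈ Finset.Ico 1 (n+1), n / i := by
    rw [hS, pv_card_pairs]
    intro i hi; simp only [Finset.mem_Ico] at hi; omega
  have hkey := Finset.card_union_add_card_inter (S.filter (fun p => p.1 ≤ x))
    (S.filter (fun p => p.2 ≤ x))
  rw [hunion, hinter, hcard2, hcard1, hScard, Finset.card_product, Nat.card_Ico,
    Nat.add_sub_cancel] at hkey
  omega


-- the folded accumulation of N // i over range(1, m+1) is the Nat divisor sum, cast to Int
lemma pv_fold_sum (n m : ℕ) :
    (PySem.List.pyRange 1 ((m : Int) + 1) 1).foldl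
      (fun a i => a + PySem.Int.floordiv (n : Int) i) 0
    = ((∑ i ∈ Finset.Ico 1 (m + 1), n / i : ℕ) : Int) := by
  rw [PySem.List.foldl_add, PySem.List.pyRange_one]
  have h1 : (((m : Int) + 1 - 1)).toNat = m := by omega
  rw [h1, List.map_map, zero_add]
  have h2 : ((fun i => PySem.Int.floordiv (n : Int) i) ∘ fun k : ℕ => (1 : Int) + (k : Int))
      = fun k : ℕ => ((n / (1 + k) : ℕ) : Int) := by
    funext k
    have : (1 : Int) + (k : Int) = ((1 + k : ℕ) : Int) := by push_cast; ring
    simp only [Function.comp, this, PySem.Int.floordiv_natCast]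
  rw [h2]
  have h3 : ((List.range m).map (fun k : ℕ => ((n / (1 + k) : ℕ) : Int))).sum
      = ∑ k ∈ Finset.range m, ((n / (1 + k) : ℕ) : Int) := rfl
  rw [h3, ← Nat.cast_sum]
  congr 1
  rw [Finset.sum_Ico_eq_sum_range]
  simp

-- on a block [i, n/(n/i)] the quotient n/k is constant
lemma pv_div_const (n i k : ℕ) (h1 : 1 ≤ i) (hk1 : i ≤ k) (hk2 : k ≤ n / (n / i)) (hin : i ≤ n) :
    n / k = n / i := by
  have hq : 0 < n / i := Nat.div_pos hin (by omega)
  have hle : n / k ≤ n / i := Nat.div_le_div_left hk1 (by omega)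
  have hge : n / i ≤ n / k := by
    have hkq : k * (n / i) ≤ n := (Nat.le_div_iff_mul_le hq).1 hk2
    exact (Nat.le_div_iff_mul_le (by omega)).2 (by rw [Nat.mul_comm]; exact hkq)
  omega

-- the block loop accumulates the tail of the divisor sum
lemma pvAltLoop_eq (n : ℕ) : ∀ (fuel i : ℕ) (ans : Int), 1 ≤ i → n + 1 ≤ i + fuel →
    pvAltLoop (n : Int) fuel (i : Int) ans
      = ans + ((∑ k ∈ Finset.Ico i (n + 1), n / k : ℕ) : Int) := by
  intro fuel
  induction fuel with
  | zero =>
    intro i ans h1 h2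
    have : Finset.Ico i (n + 1) = ∅ := Finset.Ico_eq_empty (by omega)
    simp [pvAltLoop, this]
  | succ fuel ih =>
    intro i ans h1 h2
    by_cases hin : i ≤ n
    · have hq : 0 < n / i := Nat.div_pos hin (by omega)
      set j := n / (n / i) with hj
      have hij : i ≤ j := by
        have : i * (n / i) ≤ n := by
          rw [Nat.mul_comm]; exact Nat.div_mul_le_self n i
        exact (Nat.le_div_iff_mul_le hq).2 this
      have hjn : j ≤ n := Nat.div_le_self n (n / i)
      have hstep : pvAltLoop (n : Int) (fuel + 1) (i : Int) ans
          = pvAltLoop (n : Int) fuel ((j : Int) + 1)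
              (ans + ((n / i : ℕ) : Int) * ((j : Int) - (i : Int) + 1)) := by
        simp only [pvAltLoop]
        rw [if_pos (by exact_mod_cast hin)]
        simp only [PySem.Int.floordiv_natCast, hj]
      have hcast : ((j : Int) + 1) = ((j + 1 : ℕ) : Int) := by push_cast; ring
      rw [hstep, hcast, ih (j + 1) _ (by omega) (by omega)]
      have hsplit : ∑ k ∈ Finset.Ico i (n + 1), n / k
          = (∑ k ∈ Finset.Ico i (j + 1), n / k) + ∑ k ∈ Finset.Ico (j + 1) (n + 1), n / k := by
        rw [Finset.sum_Ico_consecutive _ (by omega) (by omega)]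
      have hconst : ∑ k ∈ Finset.Ico i (j + 1), n / k = (n / i) * (j + 1 - i) := by
        rw [Finset.sum_congr rfl (fun k hk => by
          simp only [Finset.mem_Ico] at hk
          exact pv_div_const n i k h1 hk.1 (by omega) hin)]
        simp [Nat.mul_comm]
      rw [hsplit, hconst, Nat.cast_add, Nat.cast_mul, Nat.cast_sub (by omega : i ≤ j + 1),
        Nat.cast_add, Nat.cast_one]
      ring
    · have : Finset.Ico i (n + 1) = ∅ := Finset.Ico_eq_empty (by omega)
      simp only [pvAltLoop]
      rw [if_neg (by exact_mod_cast (by omega : ¬ (i : Int) ≤ (n : Int)) )]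
      simp [this]

-- ===== VERDICT (by name: the statement is the Claim_ definition above) =====
theorem calculate_gcd_probability_spec : Claim_equal_calculate_gcd_probability := by
  intro N _ hpre
  unfold Pre_calculate_gcd_probability at hpre
  unfold Spec_calculate_gcd_probability
  obtain ⟨n, rfl⟩ : ∃ n : ℕ, N = (n : Int) :=
    ⟨N.toNat, (Int.toNat_of_nonneg (by omega)).symm⟩
  simp only [calculate_gcd_probability, calculate_gcd_probability_alt, Int.toNat_natCast]
  rw [pv_fold_sum n (Nat.sqrt n)]
  have hb := pvAltLoop_eq n (n + 1) 1 0 (by omega) (by omega)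
  simp only [Nat.cast_one, zero_add] at hb
  rw [hb]
  have key := pv_hyperbola n
  have h2 : ((∑ i ∈ Finset.Ico 1 (Nat.sqrt n + 1), n / i : ℕ) : Int) * 2
      - ((Nat.sqrt n : ℕ) : Int) ^ 2
      = ((∑ i ∈ Finset.Ico 1 (n + 1), n / i : ℕ) : Int) := by
    have hc : ((∑ i ∈ Finset.Ico 1 (n+1), n / i : ℕ) : Int)
        + ((Nat.sqrt n : ℕ) : Int) * ((Nat.sqrt n : ℕ) : Int)
        = 2 * ((∑ i ∈ Finset.Ico 1 (Nat.sqrt n + 1), n / i : ℕ) : Int) := by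
      exact_mod_cast congrArg (Nat.cast : ℕ → ℤ) key
    nlinarith [hc]
  rw [h2]
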